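-- pv_equiv track=rewrite | github.com/tr1nt0n/patterns | patterns/pitch.py | get_interval_list_from_sieve
-- ===== SOURCE A (Python) =====
-- def get_interval_list_from_sieve(vector_list):
--     interval_counter = 1
--     interval_list = []
--     for i, vector in enumerate(vector_list[0:-2]):
--         if vector_list[i + 1] == 0:
--             interval_counter += 1
--         else:
--             interval_list.append(interval_counter)
--             interval_counter = 1
--     return interval_list
-- ===== SOURCE B (Python) =====
-- def get_interval_list_from_sieve(vector_list):
--     positions = [j for j in range(1, len(vector_list) - 1) if vector_list[j] != 0]
--     result = []
--     prev = 0
--     for p in positions: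
--         result.append(p - prev)
--         prev = p
--     return result
-- ===== Notes on version B (the rewrite author's own statement) =====
-- stated objective: alternative
-- what changed: A's single stateful pass with a gap counter is replaced by building the list of nonzero positions in the window range(1, len-1) and then taking successive differences of those positions in a second pass.
import Mathlib
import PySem

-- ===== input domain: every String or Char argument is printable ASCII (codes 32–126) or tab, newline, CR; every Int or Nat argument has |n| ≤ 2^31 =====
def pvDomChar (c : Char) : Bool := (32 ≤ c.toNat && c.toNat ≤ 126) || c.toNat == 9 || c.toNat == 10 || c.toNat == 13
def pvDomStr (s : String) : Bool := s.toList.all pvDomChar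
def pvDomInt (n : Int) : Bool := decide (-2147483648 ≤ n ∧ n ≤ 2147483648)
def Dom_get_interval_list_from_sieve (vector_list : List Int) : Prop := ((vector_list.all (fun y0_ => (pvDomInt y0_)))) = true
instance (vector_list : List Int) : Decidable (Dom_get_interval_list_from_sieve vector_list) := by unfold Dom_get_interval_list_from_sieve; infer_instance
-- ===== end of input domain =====

-- B replaces A's stateful gap-counter pass by a nonzero-position list plus a differences pass (alternative decomposition, same cost).

-- ===== PORT A =====
-- vector_list[i+1] is always in range here (i ranges over indices of vector_list[0:-2]), so pyGetD is exact.
def get_interval_list_from_sieve (vector_list : List Int) : List Int :=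
  ((PySem.List.enumerate (PySem.List.slice vector_list (some 0) (some (-2)))).foldl
    (fun (s : Int × List Int) (p : Int × Int) =>
      if PySem.List.pyGetD vector_list (p.1 + 1) 0 = 0 then (s.1 + 1, s.2)
      else (1, s.2 ++ [s.1]))
    (1, [])).2

-- ===== PORT B =====
-- vector_list[j] is always in range for j in range(1, len-1), so pyGetD is exact.
def get_interval_list_from_sieve_alt (vector_list : List Int) : List Int :=
  let positions := (PySem.List.pyRange 1 ((vector_list.length : Int) - 1) 1).filter
    (fun j => PySem.List.pyGetD vector_list j 0 != 0)
  (positions.foldl (fun (s : Int × List Int) p => (p, s.2 ++ [p - s.1])) (0, [])).2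

-- ===== PRECONDITION & SPEC =====
def Spec_get_interval_list_from_sieve (vector_list : List Int) (out : List Int) : Prop := out = get_interval_list_from_sieve_alt vector_list
instance (vector_list : List Int) (out : List Int) : Decidable (Spec_get_interval_list_from_sieve vector_list out) := by unfold Spec_get_interval_list_from_sieve; infer_instance

-- ===== CLAIM (what is proved, stated in full; the proofs are below) =====
def Claim_equal_get_interval_list_from_sieve : Prop := ∀ (vector_list : List Int), Dom_get_interval_list_from_sieve vector_list → Spec_get_interval_list_from_sieve vector_list (get_interval_list_from_sieve vector_list)

-- ===== LEMMAS AND PROOFS =====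

-- Main invariant: A's counter-fold over a consecutive index range, started with counter j - prev,
-- appends the same values as B's differences-fold over the nonzero positions of that range.
theorem pv_main (v : List Int) : ∀ (n : ℕ) (j prev : Int) (acc : List Int),
    ((PySem.List.pyRange j (j + n) 1).foldl
      (fun (s : Int × List Int) (i : Int) =>
        if PySem.List.pyGetD v i 0 = 0 then (s.1 + 1, s.2) else (1, s.2 ++ [s.1]))
      (j - prev, acc)).2
    = (((PySem.List.pyRange j (j + n) 1).filter
        (fun i => PySem.List.pyGetD v i 0 != 0)).foldl
        (fun (s : Int × List Int) p => (p, s.2 ++ [p - s.1])) (prev, acc)).2 := by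
  intro n
  induction n with
  | zero =>
    intro j prev acc
    rw [PySem.List.pyRange_one_eq_nil (by omega)]
    simp
  | succ n ih =>
    intro j prev acc
    have hb : ((n + 1 : ℕ) : Int) = (n : Int) + 1 := by push_cast; ring
    rw [hb, PySem.List.pyRange_one_cons (by omega)]
    have e2 : j + ((n : Int) + 1) = (j + 1) + (n : Int) := by ring
    rw [e2]
    by_cases h : PySem.List.pyGetD v j 0 = 0
    · have e1 : j - prev + 1 = (j + 1) - prev := by ring
      simp only [List.filter_cons, List.foldl_cons, h, bne_self_eq_false,
        if_false, Bool.false_eq_true]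
      rw [e1]
      exact ih (j + 1) prev acc
    · simp only [List.filter_cons, List.foldl_cons, bne, h, Bool.not_eq_true',
        beq_eq_false_iff_ne, ne_eq, not_false_eq_true, if_pos]
      have := ih (j + 1) j (acc ++ [j - prev])
      simpa using this

-- A's fold over enumerate(vector_list[0:-2]) only uses the index component: it is a fold over range(0, len(slice)).
theorem fold_enum (v : List Int) :
    get_interval_list_from_sieve v
    = ((PySem.List.pyRange 0 (((PySem.List.slice v (some 0) (some (-2))).length : Int)) 1).foldl
      (fun (s : Int × List Int) (i : Int) =>
        if PySem.List.pyGetD v (i + 1) 0 = 0 then (s.1 + 1, s.2) else (1, s.2 ++ [s.1]))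
      (1, [])).2 := by
  unfold get_interval_list_from_sieve
  rw [← List.foldl_map (f := fun (p : Int × Int) => p.1)
      (g := fun (s : Int × List Int) (i : Int) =>
        if PySem.List.pyGetD v (i + 1) 0 = 0 then (s.1 + 1, s.2) else (1, s.2 ++ [s.1])),
    PySem.List.map_fst_enumerate]
  simp

theorem get_interval_list_from_sieve_eq_alt (v : List Int) :
    get_interval_list_from_sieve v = get_interval_list_from_sieve_alt v := by
  rw [fold_enum]
  have hlen : (PySem.List.slice v (some 0) (some (-2))).length = v.length - 2 := by
    rw [PySem.List.slice_zero_start, PySem.List.slice_to_neg_ofNat v 2 (by omega)]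
    simp
  rw [hlen]
  by_cases h2 : 2 ≤ v.length
  · have hshift :
        ((PySem.List.pyRange 0 (((v.length - 2 : ℕ) : Int)) 1).foldl
          (fun (s : Int × List Int) (i : Int) =>
            if PySem.List.pyGetD v (i + 1) 0 = 0 then (s.1 + 1, s.2) else (1, s.2 ++ [s.1]))
          (1, [])).2
        = ((PySem.List.pyRange 1 (1 + ((v.length - 2 : ℕ) : Int)) 1).foldl
          (fun (s : Int × List Int) (i : Int) =>
            if PySem.List.pyGetD v i 0 = 0 then (s.1 + 1, s.2) else (1, s.2 ++ [s.1]))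
          (1, [])).2 := by
      rw [PySem.List.pyRange_one 0, PySem.List.pyRange_one 1, List.foldl_map, List.foldl_map]
      have : ((1 + ((v.length - 2 : ℕ) : Int)) - 1).toNat = (((v.length - 2 : ℕ) : Int) - 0).toNat := by
        omega
      rw [this]
      apply congrArg
      apply PySem.List.foldl_congr_mem
      intro acc x _
      simp only [zero_add]
      have : (x : Int) + 1 = 1 + (x : Int) := by ring
      rw [this]
    rw [hshift]
    have := pv_main v (v.length - 2) 1 0 []
    have harg : (1 : Int) + ((v.length - 2 : ℕ) : Int) = (v.length : Int) - 1 := by omega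
    rw [harg] at this
    norm_num at this
    rw [harg]
    simpa [get_interval_list_from_sieve_alt] using this
  · have hnil : PySem.List.pyRange 0 (((v.length - 2 : ℕ) : Int)) 1 = [] :=
      PySem.List.pyRange_one_eq_nil (by omega)
    have hnil2 : PySem.List.pyRange 1 ((v.length : Int) - 1) 1 = [] :=
      PySem.List.pyRange_one_eq_nil (by omega)
    rw [hnil]
    simp [get_interval_list_from_sieve_alt, hnil2]

-- ===== VERDICT (by name: the statement is the Claim_ definition above) =====
theorem get_interval_list_from_sieve_spec : Claim_equal_get_interval_list_from_sieve := by
  intro v _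
  exact get_interval_list_from_sieve_eq_alt v
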